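-- pv_equiv track=rewrite | github.com/solvin-ai/solvin | agentic/backend/old/modules.old/tools_replace_function_in_file_java.py | normalize_signature
-- ===== SOURCE A (Python) =====
-- def normalize_signature(sig: str) -> str:
--     """
--     Normalizes a signature string by collapsing multiple whitespace characters.
--     Also reorders any recognized modifiers.
--     """
--     cleaned = " ".join(sig.split())
--     valid_modifiers = {"public", "protected", "private", "static",
--                        "abstract", "final", "synchronized", "native",
--                        "strictfp", "default"}
--     tokens = cleaned.split(" ")
--     modifiers = []
--     remainder = []
--     for token in tokens:
--         if token in valid_modifiers:
--             modifiers.append(token)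
--         else:
--             remainder.append(token)
--     normalized_modifiers = " ".join(sorted(modifiers))
--     normalized = (normalized_modifiers + " " if normalized_modifiers and remainder else "") + " ".join(remainder)
--     return normalized.strip()
-- ===== SOURCE B (Python) =====
-- def normalize_signature(sig: str) -> str:
--     """Collapse whitespace and pull recognized modifiers, alphabetically sorted,
--     to the front; one stable keyed sort instead of a partition pass.
--     (Unlike the original, an all-modifier signature keeps its modifiers.)"""
--     valid_modifiers = {"public", "protected", "private", "static",
--                        "abstract", "final", "synchronized", "native",
--                        "strictfp", "default"}
--     tokens = sig.split()
--     return " ".join(sorted(tokens, key=lambda t: (0, t) if t in valid_modifiers else (1,)))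
-- ===== Notes on version B (the rewrite author's own statement) =====
-- stated objective: simpler
-- what changed: Replaces A's collapse-join-resplit, explicit partition loop and conditional concatenation+strip with a single stable sort whose composite key pulls modifiers (alphabetical) to the front and leaves all other tokens in original order.
-- intended difference: On signatures whose tokens are all recognized modifiers (at least one), A returns the empty string because its conditional concatenation drops the modifiers when the remainder is empty, while B returns the sorted modifiers, which is the intended normalization. — e.g. on normalize_signature("public static"): A returns "", B returns "public static"
import Mathlib
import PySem

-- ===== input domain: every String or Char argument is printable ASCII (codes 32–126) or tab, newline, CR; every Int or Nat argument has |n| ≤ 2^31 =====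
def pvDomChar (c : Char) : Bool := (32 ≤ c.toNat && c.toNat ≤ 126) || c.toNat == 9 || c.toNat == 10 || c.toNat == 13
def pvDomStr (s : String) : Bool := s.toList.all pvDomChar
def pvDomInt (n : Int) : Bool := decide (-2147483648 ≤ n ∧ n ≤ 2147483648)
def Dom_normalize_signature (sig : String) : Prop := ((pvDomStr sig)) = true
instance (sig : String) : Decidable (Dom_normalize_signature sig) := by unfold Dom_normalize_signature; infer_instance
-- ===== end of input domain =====

-- B replaces A's partition loop and conditional concatenation with one stable keyed sort (objective: simpler);
-- on all-modifier signatures A drops everything (returns "") while B keeps the sorted modifiers (see D_ below).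

-- ===== PORT A =====
-- the `valid_modifiers` set literal, shared by both ports
def pvValidModifiers : PySem.Set String :=
  PySem.Set.ofList ["public", "protected", "private", "static",
                    "abstract", "final", "synchronized", "native",
                    "strictfp", "default"]

def normalize_signature (sig : String) : String :=
  let cleaned := PySem.Str.join " " (PySem.Str.split₀ sig)
  let tokens := (PySem.Str.split? cleaned " ").getD []  -- sep " " is nonempty, so split? is always `some`; exact
  let mr :=
    tokens.foldl
      (fun (p : List String × List String) token =>
        if PySem.Set.contains pvValidModifiers token then (p.1 ++ [token], p.2)
        else (p.1, p.2 ++ [token]))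
      ([], [])
  -- sorted(modifiers): Python's string order is ported as lex order on the char lists (t.toList)
  let normalized_modifiers := PySem.Str.join " " (PySem.List.sorted mr.1 (fun t => t.toList))
  let normalized :=
    (if normalized_modifiers ≠ "" ∧ mr.2 ≠ [] then normalized_modifiers ++ " " else "")
      ++ PySem.Str.join " " mr.2
  PySem.Str.strip normalized

-- ===== PORT B =====
def normalize_signature_alt (sig : String) : String :=
  let tokens := PySem.Str.split₀ sig
  -- Python's key t ↦ (0, t) / (1,) is ported as the two-component key (k1, k2):
  -- non-modifiers share the constant second component "", inducing the same ordering as the 1-tuple (1,)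
  PySem.Str.join " "
    (PySem.List.sorted2 tokens
      (fun t => if PySem.Set.contains pvValidModifiers t then (0 : Nat) else 1)
      (fun t => if PySem.Set.contains pvValidModifiers t then t.toList else ([] : List Char)))

-- ===== PRECONDITION & SPEC =====
-- On signatures whose whitespace-separated tokens are all recognized modifiers (and there is at least one),
-- A returns "" (its conditional concatenation drops the modifiers when the remainder is empty) while B
-- returns the sorted modifiers, which is the intended normalization.
def D_normalize_signature (sig : String) : Prop :=
  PySem.Chars.lstrip sig.toList ≠ [] ∧
    ∀ w ∈ List.splitOnP (fun c => PySem.Chars.isspace c) sig.toList,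
      w = [] ∨ String.ofList w ∈ pvValidModifiers
instance (sig : String) : Decidable (D_normalize_signature sig) := by
  unfold D_normalize_signature; infer_instance

def Spec_normalize_signature (sig : String) (out : String) : Prop :=
  ¬ D_normalize_signature sig → out = normalize_signature_alt sig
instance (sig : String) (out : String) : Decidable (Spec_normalize_signature sig out) := by
  unfold Spec_normalize_signature; infer_instance

def pvDiffWitness_normalize_signature : String := "public static"
def pvDiffWitnessOut_normalize_signature : String × String := ("", "public static")

-- ===== CLAIM (what is proved, stated in full; the proofs are below) =====
def Claim_unchanged_normalize_signature : Prop :=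
  ∀ (sig : String), Dom_normalize_signature sig → Spec_normalize_signature sig (normalize_signature sig)
def Claim_changed_normalize_signature : Prop :=
  Dom_normalize_signature (pvDiffWitness_normalize_signature) ∧
  D_normalize_signature (pvDiffWitness_normalize_signature) ∧
  normalize_signature (pvDiffWitness_normalize_signature) = pvDiffWitnessOut_normalize_signature.1 ∧
  normalize_signature_alt (pvDiffWitness_normalize_signature) = pvDiffWitnessOut_normalize_signature.2 ∧
  pvDiffWitnessOut_normalize_signature.1 ≠ pvDiffWitnessOut_normalize_signature.2
def Claim_exact_normalize_signature : Prop :=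
  ∀ (sig : String), Dom_normalize_signature sig → D_normalize_signature sig →
    normalize_signature sig ≠ normalize_signature_alt sig

-- ===== LEMMAS AND PROOFS =====

def pvGood (t : List Char) : Prop := t ≠ [] ∧ ∀ c ∈ t, PySem.Chars.isspace c = false

theorem pvValid_eq :
    pvValidModifiers = ["public", "protected", "private", "static", "abstract",
                        "final", "synchronized", "native", "strictfp", "default"] := by
  decide

theorem contains_valid_iff (t : String) :
    PySem.Set.contains pvValidModifiers t = true ↔
      t ∈ ["public", "protected", "private", "static", "abstract",
           "final", "synchronized", "native", "strictfp", "default"] := by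
  rw [pvValid_eq]; simp [PySem.Set.contains]


theorem split₀_go_good (s : List Char) : ∀ (cur : List Char) (acc : List (List Char)),
    (∀ c ∈ cur, PySem.Chars.isspace c = false) → (∀ t ∈ acc, pvGood t) →
    ∀ t ∈ PySem.Chars.split₀.go s cur acc, pvGood t := by
  induction s with
  | nil =>
      intro cur acc hcur hacc t ht
      simp only [PySem.Chars.split₀.go] at ht
      by_cases h : cur.isEmpty = true
      · simp [h] at ht; exact hacc t ht
      · simp [h] at ht
        rcases ht with h1 | h1
        · exact hacc t h1
        · subst h1
          refine ⟨by simpa [List.isEmpty_iff] using h, ?_⟩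
          intro c hc; exact hcur c (by simpa using hc)
  | cons c rest ih =>
      intro cur acc hcur hacc t ht
      simp only [PySem.Chars.split₀.go] at ht
      by_cases hs : PySem.Chars.isspace c = true
      · by_cases he : cur.isEmpty = true
        · simp [hs, he] at ht
          exact ih [] acc (by simp) hacc t ht
        · simp [hs, he] at ht
          refine ih [] _ (by simp) ?_ t ht
          intro u hu
          rcases List.mem_cons.mp hu with h1 | h1
          · subst h1
            exact ⟨by simpa [List.isEmpty_iff] using he, fun d hd => hcur d (by simpa using hd)⟩
          · exact hacc u h1
      · simp [hs] at ht
        refine ih (c :: cur) acc ?_ hacc t ht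
        intro d hd
        rcases List.mem_cons.mp hd with h1 | h1
        · subst h1; simpa using hs
        · exact hcur d h1

theorem split₀_good (s : List Char) : ∀ t ∈ PySem.Chars.split₀ s, pvGood t := by
  simpa [PySem.Chars.split₀] using split₀_go_good s [] [] (by simp) (by simp)
def pvMyS : List Char → List Char → List (List Char)
  | [], cur => [cur.reverse]
  | c :: rest, cur => if c = ' ' then cur.reverse :: pvMyS rest [] else pvMyS rest (c :: cur)

theorem splitOn_go_space (fuel : Nat) : ∀ (l cur : List Char) (acc : List (List Char)),
    l.length < fuel →
    PySem.Chars.splitOn.go [' '] fuel l cur acc = acc.reverse ++ pvMyS l cur := by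
  induction fuel with
  | zero => intro l cur acc h; omega
  | succ fuel ih =>
      intro l cur acc h
      cases l with
      | nil => simp [PySem.Chars.splitOn.go, pvMyS]
      | cons c rest =>
          by_cases hc : c = ' '
          · subst hc
            have hp : List.isPrefixOf [' '] (' ' :: rest) = true := by simp [List.isPrefixOf]
            simp only [PySem.Chars.splitOn.go, hp, if_true, List.length_cons,
              List.drop_succ_cons, List.length_nil, List.drop_zero]
            rw [ih rest [] (cur.reverse :: acc) (by simp at h ⊢; omega)]
            simp [pvMyS]
          · have hp : List.isPrefixOf [' '] (c :: rest) = false := by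
              simp [List.isPrefixOf]; exact fun h' => (hc h'.symm).elim
            simp only [PySem.Chars.splitOn.go, hp]
            rw [ih rest (c :: cur) acc (by simp at h ⊢; omega)]
            simp [pvMyS, hc]

theorem splitOn_space (s : List Char) : PySem.Chars.splitOn s [' '] = pvMyS s [] := by
  simpa [PySem.Chars.splitOn] using splitOn_go_space (s.length + 1) s [] [] (by omega)

theorem myS_all (t : List Char) : ∀ (cur : List Char), (∀ c ∈ t, c ≠ ' ') →
    pvMyS t cur = [cur.reverse ++ t] := by
  induction t with
  | nil => intro cur h; simp [pvMyS]
  | cons c rest ih =>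
      intro cur h
      have hc : c ≠ ' ' := h c (by simp)
      simp only [pvMyS, if_neg hc]
      rw [ih (c :: cur) (fun d hd => h d (by simp [hd]))]
      simp

theorem myS_sep (t : List Char) : ∀ (cur l : List Char), (∀ c ∈ t, c ≠ ' ') →
    pvMyS (t ++ ' ' :: l) cur = (cur.reverse ++ t) :: pvMyS l [] := by
  induction t with
  | nil => intro cur l h; simp [pvMyS]
  | cons c rest ih =>
      intro cur l h
      have hc : c ≠ ' ' := h c (by simp)
      simp only [List.cons_append, pvMyS, if_neg hc]
      rw [ih (c :: cur) l (fun d hd => h d (by simp [hd]))]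
      simp

theorem myS_join (ts : List (List Char)) (h : ∀ t ∈ ts, ∀ c ∈ t, c ≠ ' ') (hne : ts ≠ []) :
    pvMyS (PySem.Chars.join [' '] ts) [] = ts := by
  induction ts with
  | nil => simp at hne
  | cons t ts ih =>
      cases ts with
      | nil =>
          rw [PySem.Chars.join_singleton]
          simpa using myS_all t [] (h t (by simp))
      | cons t' ts' =>
          rw [PySem.Chars.join_cons_cons]
          have : t ++ [' '] ++ PySem.Chars.join [' '] (t' :: ts') =
              t ++ ' ' :: PySem.Chars.join [' '] (t' :: ts') := by simp
          rw [this, myS_sep t [] _ (h t (by simp))]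
          simp only [List.reverse_nil, List.nil_append]
          rw [ih (fun u hu => h u (by simp [List.mem_cons] at hu ⊢; tauto)) (by simp)]

theorem join_cons (sep t : List Char) (ts : List (List Char)) :
    ∃ r, PySem.Chars.join sep (t :: ts) = t ++ r := by
  cases ts with
  | nil => exact ⟨[], by simp [PySem.Chars.join_singleton]⟩
  | cons t' ts' => exact ⟨sep ++ PySem.Chars.join sep (t' :: ts'), by
      rw [PySem.Chars.join_cons_cons]; simp⟩

theorem join_last (ts : List (List Char)) (h : ∀ t ∈ ts, pvGood t) (hne : ts ≠ []) :
    ∃ ys c, PySem.Chars.join [' '] ts = ys ++ [c] ∧ PySem.Chars.isspace c = false := by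
  induction ts with
  | nil => simp at hne
  | cons t ts ih =>
      cases ts with
      | nil =>
          obtain ⟨hne', hns⟩ := h t (by simp)
          refine ⟨t.dropLast, t.getLast hne', ?_, hns _ (List.getLast_mem hne')⟩
          rw [PySem.Chars.join_singleton, List.dropLast_append_getLast hne']
      | cons t' ts' =>
          obtain ⟨ys, c, hj, hc⟩ := ih (fun u hu => h u (by simp [List.mem_cons] at hu ⊢; tauto)) (by simp)
          exact ⟨t ++ [' '] ++ ys, c, by rw [PySem.Chars.join_cons_cons, hj]; simp, hc⟩

theorem strip_join (ts : List (List Char)) (h : ∀ t ∈ ts, pvGood t) (hne : ts ≠ []) :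
    PySem.Chars.strip (PySem.Chars.join [' '] ts) = PySem.Chars.join [' '] ts := by
  obtain ⟨t, ts', rfl⟩ := List.exists_cons_of_ne_nil hne
  obtain ⟨r, hr⟩ := join_cons [' '] t ts'
  obtain ⟨hne', hns⟩ := h t (by simp)
  obtain ⟨c0, t', rfl⟩ := List.exists_cons_of_ne_nil hne'
  obtain ⟨ys, c, hj, hc⟩ := join_last _ h hne
  have h0 : PySem.Chars.isspace c0 = false := hns c0 (by simp)
  rw [PySem.Chars.strip, PySem.Chars.lstrip]
  rw [hr, List.cons_append, List.dropWhile_cons, h0]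
  simp only [Bool.false_eq_true, if_false]
  rw [← List.cons_append, ← hr, hj, PySem.Chars.rstrip]
  simp [hc]
theorem partition_foldl {α : Type} (q : α → Bool) (ts : List α) (m r : List α) :
    ts.foldl (fun (p : List α × List α) t =>
        if q t then (p.1 ++ [t], p.2) else (p.1, p.2 ++ [t])) (m, r) =
      (m ++ ts.filter q, r ++ ts.filter (fun t => !q t)) := by
  induction ts generalizing m r with
  | nil => simp
  | cons t ts ih =>
      by_cases h : q t = true <;> simp [h, ih, List.filter_cons]

theorem join_append (sep : List Char) (xs ys : List (List Char)) (hx : xs ≠ []) (hy : ys ≠ []) :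
    PySem.Chars.join sep (xs ++ ys) =
      PySem.Chars.join sep xs ++ sep ++ PySem.Chars.join sep ys := by
  induction xs with
  | nil => simp at hx
  | cons x xs ih =>
      cases xs with
      | nil =>
          cases ys with
          | nil => simp at hy
          | cons y ys => simp [PySem.Chars.join_singleton, PySem.Chars.join_cons_cons]
      | cons x' xs' =>
          have h1 : (x :: x' :: xs') ++ ys = x :: x' :: (xs' ++ ys) := rfl
          have h2 : x' :: (xs' ++ ys) = (x' :: xs') ++ ys := rfl
          rw [h1, PySem.Chars.join_cons_cons, h2, ih (by simp), PySem.Chars.join_cons_cons]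
          simp [List.append_assoc]


def pvBefore (p : String → Bool) (a b : String) : Bool :=
  decide ((if p a then (0:Nat) else 1) < (if p b then (0:Nat) else 1)) ||
    (!decide ((if p b then (0:Nat) else 1) < (if p a then (0:Nat) else 1)) &&
      decide ((if p a then a.toList else ([] : List Char)) < (if p b then b.toList else ([] : List Char))))

theorem pvBefore_mod_mod (p : String → Bool) (a b : String) (ha : p a = true) (hb : p b = true) :
    pvBefore p a b = decide (a.toList < b.toList) := by simp [pvBefore, ha, hb]
theorem pvBefore_mod_non (p : String → Bool) (a b : String) (ha : p a = true) (hb : p b = false) :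
    pvBefore p a b = true := by simp [pvBefore, ha, hb]
theorem pvBefore_non (p : String → Bool) (a b : String) (ha : p a = false) :
    pvBefore p a b = false := by
  by_cases hb : p b = true <;> simp_all [pvBefore]

theorem ins_non (p : String → Bool) (x : String) (S R : List String)
    (hx : p x = false) (hS : ∀ y ∈ S, p y = true) (hR : ∀ y ∈ R, p y = false) :
    PySem.List.insertBy (pvBefore p) x (S ++ R) = (S ++ R) ++ [x] := by
  refine PySem.List.insertBy_of_forall_not_before _ _ _ ?_
  intro y _; exact pvBefore_non p x y hx

theorem ins_mod (p : String → Bool) (x : String) (S R : List String)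
    (hx : p x = true) (hS : ∀ y ∈ S, p y = true) (hR : ∀ y ∈ R, p y = false) :
    PySem.List.insertBy (pvBefore p) x (S ++ R) =
      PySem.List.insertBy (fun a b => decide (a.toList < b.toList)) x S ++ R := by
  induction S with
  | nil =>
      cases R with
      | nil => simp [PySem.List.insertBy]
      | cons r R' =>
          have : pvBefore p x r = true := pvBefore_mod_non p x r hx (hR r (by simp))
          simp [PySem.List.insertBy, this]
  | cons s S' ih =>
      have hs : p s = true := hS s (by simp)
      have heq : pvBefore p x s = decide (x.toList < s.toList) := pvBefore_mod_mod p x s hx hs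
      
      by_cases hlt : x.toList < s.toList
      · simp [PySem.List.insertBy, heq, hlt]
      · simp only [List.cons_append, PySem.List.insertBy, heq]
        rw [ih (fun y hy => hS y (by simp [hy]))]
        simp [PySem.List.insertBy, hlt]

theorem fold_split (p : String → Bool) (ts : List String) : ∀ (S R : List String),
    (∀ y ∈ S, p y = true) → (∀ y ∈ R, p y = false) →
    ts.foldl (fun acc x => PySem.List.insertBy (pvBefore p) x acc) (S ++ R) =
      (ts.filter p).foldl (fun acc x => PySem.List.insertBy (fun a b => decide (a.toList < b.toList)) x acc) S
        ++ R ++ ts.filter (fun t => !p t) := by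
  induction ts with
  | nil => intro S R hS hR; simp
  | cons t ts ih =>
      intro S R hS hR
      by_cases ht : p t = true
      · simp only [List.foldl_cons, List.filter_cons, ht, if_true]
        rw [ins_mod p t S R ht hS hR]
        rw [ih (PySem.List.insertBy (fun a b => decide (a.toList < b.toList)) t S) R
          (fun y hy => ((PySem.List.mem_insertBy _ _ _ _).mp hy).elim
            (fun h => h ▸ ht) (fun h => hS y h)) hR]
        simp [ht]
      · simp only [Bool.not_eq_true] at ht
        simp only [List.foldl_cons, List.filter_cons, ht]
        rw [show S ++ R = S ++ R from rfl]
        have : PySem.List.insertBy (pvBefore p) t (S ++ R) = S ++ (R ++ [t]) := by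
          rw [ins_non p t S R ht hS hR, List.append_assoc]
        rw [this, ih S (R ++ [t]) hS
          (fun y hy => (List.mem_append.mp hy).elim (fun h => hR y h)
            (fun h => by simp at h; exact h ▸ ht))]
        simp [ht]


theorem sorted2_split (ts : List String) :
    PySem.List.sorted2 ts
        (fun t => if PySem.Set.contains pvValidModifiers t then (0 : Nat) else 1)
        (fun t => if PySem.Set.contains pvValidModifiers t then t.toList else ([] : List Char)) =
      PySem.List.sorted (ts.filter (fun t => PySem.Set.contains pvValidModifiers t)) (fun t => t.toList) ++
        ts.filter (fun t => !PySem.Set.contains pvValidModifiers t) := by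
  have h1 : PySem.List.sorted2 ts
        (fun t => if PySem.Set.contains pvValidModifiers t then (0 : Nat) else 1)
        (fun t => if PySem.Set.contains pvValidModifiers t then t.toList else ([] : List Char)) =
      ts.foldl (fun acc x =>
        PySem.List.insertBy (pvBefore (fun t => PySem.Set.contains pvValidModifiers t)) x acc) [] := by
    rfl
  rw [h1, PySem.List.sorted_eq_foldl_insertBy]
  have h2 := fold_split (fun t => PySem.Set.contains pvValidModifiers t) ts [] [] (by simp) (by simp)
  simp only [List.nil_append, List.append_nil] at h2
  exact h2
-- proof-level glue (String-level versions), appended below the big lemmas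

theorem toList_ofList (cs : List Char) : (String.ofList cs).toList = cs := by simp

theorem good_str (sig : String) : ∀ t ∈ PySem.Str.split₀ sig, pvGood t.toList := by
  intro t ht
  simp only [PySem.Str.split₀, List.mem_map] at ht
  obtain ⟨u, hu, rfl⟩ := ht
  simpa [toList_ofList] using split₀_good sig.toList u hu

theorem map_toList_split₀ (sig : String) :
    (PySem.Str.split₀ sig).map String.toList = PySem.Chars.split₀ sig.toList := by
  simp [PySem.Str.split₀, List.map_map, Function.comp_def, toList_ofList]

theorem tokens_eq (sig : String) :
    (PySem.Str.split? (PySem.Str.join " " (PySem.Str.split₀ sig)) " ").getD [] =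
      if PySem.Str.split₀ sig = [] then [""] else PySem.Str.split₀ sig := by
  have hsep : (" " : String).toList = [' '] := rfl
  have hjoin : (PySem.Str.join " " (PySem.Str.split₀ sig)).toList =
      PySem.Chars.join [' '] (PySem.Chars.split₀ sig.toList) := by
    rw [PySem.Str.toList_join, map_toList_split₀, hsep]
  by_cases hts : PySem.Str.split₀ sig = []
  · have htsc : PySem.Chars.split₀ sig.toList = [] := by
      rw [← map_toList_split₀, hts]; rfl
    rw [if_pos hts]
    simp only [PySem.Str.split?, hjoin, htsc, PySem.Chars.join_nil, hsep]
    rw [PySem.Chars.split?, if_neg (by simp), splitOn_space]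
    rfl
  · have htsc : PySem.Chars.split₀ sig.toList ≠ [] := by
      intro h
      exact hts (by simp [PySem.Str.split₀, h])
    have hns : ∀ t ∈ PySem.Chars.split₀ sig.toList, ∀ c ∈ t, c ≠ ' ' := by
      intro t ht c hc
      have := (split₀_good sig.toList t ht).2 c hc
      intro h; subst h; simp [PySem.Chars.isspace] at this
    rw [if_neg hts]
    simp only [PySem.Str.split?, hjoin, hsep]
    rw [PySem.Chars.split?, if_neg (by simp), splitOn_space, myS_join _ hns htsc]
    rfl

-- A's body as a function of the token list
def pvABody (tokens : List String) : String :=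
  let mr :=
    tokens.foldl
      (fun (p : List String × List String) token =>
        if PySem.Set.contains pvValidModifiers token then (p.1 ++ [token], p.2)
        else (p.1, p.2 ++ [token]))
      ([], [])
  let normalized_modifiers := PySem.Str.join " " (PySem.List.sorted mr.1 (fun t => t.toList))
  let normalized :=
    (if normalized_modifiers ≠ "" ∧ mr.2 ≠ [] then normalized_modifiers ++ " " else "")
      ++ PySem.Str.join " " mr.2
  PySem.Str.strip normalized

theorem A_eq (sig : String) :
    normalize_signature sig =
      pvABody ((PySem.Str.split? (PySem.Str.join " " (PySem.Str.split₀ sig)) " ").getD []) := rfl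

theorem join_cons_str (t : String) (ts : List String) :
    ∃ r, (PySem.Str.join " " (t :: ts)).toList = t.toList ++ r := by
  obtain ⟨r, hr⟩ := join_cons [' '] t.toList (ts.map String.toList)
  exact ⟨r, by rw [PySem.Str.toList_join]; simpa using hr⟩

theorem join_ne_empty (xs : List String) (h : ∀ t ∈ xs, pvGood t.toList) (hx : xs ≠ []) :
    PySem.Str.join " " xs ≠ "" := by
  obtain ⟨t, ts, rfl⟩ := List.exists_cons_of_ne_nil hx
  obtain ⟨r, hr⟩ := join_cons_str t ts
  intro hcon
  rw [hcon] at hr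
  have := (h t (by simp)).1
  cases h' : t.toList with
  | nil => exact this h'
  | cons c cs => rw [h'] at hr; simp at hr

theorem strip_join_str (xs : List String) (h : ∀ t ∈ xs, pvGood t.toList) (hx : xs ≠ []) :
    PySem.Str.strip (PySem.Str.join " " xs) = PySem.Str.join " " xs := by
  apply String.toList_inj.mp
  rw [PySem.Str.toList_strip, PySem.Str.toList_join]
  have hsep : (" " : String).toList = [' '] := rfl
  rw [hsep]
  exact strip_join (xs.map String.toList)
    (by intro t ht; simp only [List.mem_map] at ht; obtain ⟨u, hu, rfl⟩ := ht; exact h u hu)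
    (by simpa using hx)

theorem join_append_str (xs ys : List String) (hx : xs ≠ []) (hy : ys ≠ []) :
    (PySem.Str.join " " xs ++ " ") ++ PySem.Str.join " " ys = PySem.Str.join " " (xs ++ ys) := by
  apply String.toList_inj.mp
  have hsep : (" " : String).toList = [' '] := rfl
  simp only [String.toList_append, PySem.Str.toList_join, hsep, List.map_append]
  rw [join_append [' '] (xs.map String.toList) (ys.map String.toList)
    (by simpa using hx) (by simpa using hy)]

theorem empty_append_str (s : String) : ("" : String) ++ s = s := by
  apply String.toList_inj.mp; simp

theorem pvABody_char (ts : List String) (hts : ts ≠ []) (hgood : ∀ t ∈ ts, pvGood t.toList) :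
    pvABody ts =
      if ts.filter (fun t => !PySem.Set.contains pvValidModifiers t) = [] then "" else
      PySem.Str.join " "
        (PySem.List.sorted (ts.filter (fun t => PySem.Set.contains pvValidModifiers t)) (fun t => t.toList) ++
          ts.filter (fun t => !PySem.Set.contains pvValidModifiers t)) := by
  have hfold := partition_foldl (fun t => PySem.Set.contains pvValidModifiers t) ts [] []
  simp only [pvABody, hfold, List.nil_append]
  set F := ts.filter (fun t => PySem.Set.contains pvValidModifiers t) with hF
  set R := ts.filter (fun t => !PySem.Set.contains pvValidModifiers t) with hR
  have hgoodF : ∀ t ∈ PySem.List.sorted F (fun t => t.toList), pvGood t.toList := by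
    intro t ht
    have : t ∈ F := (PySem.List.sorted_perm F (fun t => t.toList) false).mem_iff.mp ht
    exact hgood t (List.mem_of_mem_filter this)
  have hgoodR : ∀ t ∈ R, pvGood t.toList := fun t ht => hgood t (List.mem_of_mem_filter ht)
  by_cases hRnil : R = []
  · rw [if_pos hRnil, hRnil]
    rw [if_neg (by simp)]
    rw [empty_append_str]
    decide
  · rw [if_neg hRnil]
    by_cases hFnil : F = []
    · have hsF : PySem.List.sorted F (fun t => t.toList) = [] := by
        rw [hFnil]; rfl
      rw [hsF]
      rw [if_neg (by simp [PySem.Str.join, PySem.Chars.join_nil])]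
      rw [empty_append_str, List.nil_append]
      exact strip_join_str R hgoodR hRnil
    · have hsF : PySem.List.sorted F (fun t => t.toList) ≠ [] := by
        simpa using (PySem.List.sorted_eq_nil_iff F (fun t => t.toList) false).not.mpr hFnil
      rw [if_pos ⟨join_ne_empty _ hgoodF hsF, hRnil⟩]
      rw [join_append_str _ _ hsF hRnil]
      apply strip_join_str
      · intro t ht
        rcases List.mem_append.mp ht with h1 | h1
        · exact hgoodF t h1
        · exact hgoodR t h1
      · simp [hsF]

theorem A_char (sig : String) :
    normalize_signature sig =
      if PySem.Str.split₀ sig = [] then "" else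
      if (PySem.Str.split₀ sig).filter (fun t => !PySem.Set.contains pvValidModifiers t) = [] then "" else
      PySem.Str.join " "
        (PySem.List.sorted ((PySem.Str.split₀ sig).filter
            (fun t => PySem.Set.contains pvValidModifiers t)) (fun t => t.toList) ++
          (PySem.Str.split₀ sig).filter (fun t => !PySem.Set.contains pvValidModifiers t)) := by
  rw [A_eq, tokens_eq]
  by_cases hts : PySem.Str.split₀ sig = []
  · rw [if_pos hts, if_pos hts]; decide
  · rw [if_neg hts, if_neg hts]
    exact pvABody_char _ hts (good_str sig)

theorem B_char (sig : String) :
    normalize_signature_alt sig =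
      PySem.Str.join " "
        (PySem.List.sorted ((PySem.Str.split₀ sig).filter
            (fun t => PySem.Set.contains pvValidModifiers t)) (fun t => t.toList) ++
          (PySem.Str.split₀ sig).filter (fun t => !PySem.Set.contains pvValidModifiers t)) := by
  simp only [normalize_signature_alt]
  rw [sorted2_split]

theorem filter_non_nil_iff (sig : String) :
    (PySem.Str.split₀ sig).filter (fun t => !PySem.Set.contains pvValidModifiers t) = [] ↔
      ∀ t ∈ PySem.Str.split₀ sig,
        t ∈ ["public", "protected", "private", "static", "abstract",
             "final", "synchronized", "native", "strictfp", "default"] := by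
  rw [List.filter_eq_nil_iff]
  constructor
  · intro h t ht
    have := h t ht
    exact (contains_valid_iff t).mp (by simpa using this)
  · intro h t ht hcon
    rw [(contains_valid_iff t).mpr (h t ht)] at hcon
    simp at hcon

theorem go_splitOnP (s : List Char) : ∀ (cur : List Char) (acc : List (List Char)),
    PySem.Chars.split₀.go s cur acc =
      acc.reverse ++
        (((List.splitOnP (fun c => PySem.Chars.isspace c) s).modifyHead
          (fun w => cur.reverse ++ w)).filter (fun w => !w.isEmpty)) := by
  induction s with
  | nil =>
      intro cur acc
      simp only [PySem.Chars.split₀.go, List.splitOnP_nil, List.modifyHead_cons]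
      by_cases h : cur.isEmpty = true
      · simp [h, List.isEmpty_iff.mp h]
      · have h2 : cur ≠ [] := by simpa [List.isEmpty_iff] using h
        have h3 : cur.reverse ≠ [] := by simpa using h2
        simp [h, List.filter_cons, h3]
  | cons c rest ih =>
      intro cur acc
      rw [List.splitOnP_cons]
      by_cases hs : PySem.Chars.isspace c = true
      · simp only [PySem.Chars.split₀.go, hs, if_true, List.modifyHead_cons]
        by_cases he : cur.isEmpty = true
        · simp only [he, if_true]
          rw [ih [] acc]
          simp [List.filter_cons, List.isEmpty_iff.mp he]
          congr 1
          cases h' : List.splitOnP (fun c => PySem.Chars.isspace c) rest with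
          | nil => simp
          | cons w ws => simp
        · simp only [he, Bool.false_eq_true, if_false]
          rw [ih [] (cur.reverse :: acc)]
          simp [List.filter_cons, he]
          congr 1
          cases h' : List.splitOnP (fun c => PySem.Chars.isspace c) rest with
          | nil => simp
          | cons w ws => simp
      · simp only [PySem.Chars.split₀.go, hs, Bool.false_eq_true, if_false]
        rw [ih (c :: cur) acc]
        congr 2
        cases h' : List.splitOnP (fun c => PySem.Chars.isspace c) rest with
        | nil => exact absurd h' (List.splitOnP_ne_nil _ _)
        | cons w ws => simp

theorem split₀_eq_splitOnP (cs : List Char) :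
    PySem.Chars.split₀ cs =
      (List.splitOnP (fun c => PySem.Chars.isspace c) cs).filter (fun w => !w.isEmpty) := by
  rw [PySem.Chars.split₀, go_splitOnP cs [] []]
  simp
  congr 1
  cases h' : List.splitOnP (fun c => PySem.Chars.isspace c) cs with
  | nil => simp
  | cons w ws => simp

theorem allp_iff (p : Char → Bool) (cs : List Char) :
    (∀ w ∈ List.splitOnP p cs, w = []) ↔ ∀ c ∈ cs, p c = true := by
  induction cs with
  | nil => simp
  | cons c rest ih =>
      rw [List.splitOnP_cons]
      by_cases hc : p c = true
      · simp [hc, ih]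
      · cases h' : List.splitOnP p rest with
        | nil => exact absurd h' (List.splitOnP_ne_nil _ _)
        | cons w ws =>
            simp only [hc, Bool.false_eq_true, if_false, List.modifyHead_cons]
            constructor
            · intro h; exact absurd (h (c :: w) (by simp)) (by simp)
            · intro h; exact absurd (h c (by simp)) hc

theorem split₀_mem_iff (sig : String) (t : String) :
    t ∈ PySem.Str.split₀ sig ↔
      ∃ w ∈ List.splitOnP (fun c => PySem.Chars.isspace c) sig.toList,
        w ≠ [] ∧ t = String.ofList w := by
  rw [PySem.Str.split₀, split₀_eq_splitOnP]
  simp only [List.mem_map, List.mem_filter]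
  constructor
  · rintro ⟨w, ⟨hw, hne⟩, rfl⟩
    exact ⟨w, hw, by simpa [List.isEmpty_iff] using hne, rfl⟩
  · rintro ⟨w, hw, hne, rfl⟩
    exact ⟨w, ⟨hw, by simpa [List.isEmpty_iff] using hne⟩, rfl⟩

theorem D_iff (sig : String) :
    D_normalize_signature sig ↔
      (PySem.Str.split₀ sig ≠ [] ∧ ∀ t ∈ PySem.Str.split₀ sig,
        t ∈ ["public", "protected", "private", "static", "abstract",
             "final", "synchronized", "native", "strictfp", "default"]) := by
  unfold D_normalize_signature
  have h1 : PySem.Chars.lstrip sig.toList ≠ [] ↔ PySem.Str.split₀ sig ≠ [] := by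
    rw [PySem.Str.split₀, split₀_eq_splitOnP, PySem.Chars.lstrip]
    simp only [ne_eq, List.dropWhile_eq_nil_iff, List.map_eq_nil_iff, List.filter_eq_nil_iff]
    rw [not_iff_not]
    rw [← allp_iff (fun c => PySem.Chars.isspace c) sig.toList]
    constructor
    · intro h w hw
      have := h w hw
      simpa [List.isEmpty_iff] using this
    · intro h w hw
      have := h w hw
      simpa [List.isEmpty_iff] using this
  rw [h1]
  constructor
  · rintro ⟨ha, h2⟩
    refine ⟨ha, ?_⟩
    intro t ht
    obtain ⟨w, hw, hne, rfl⟩ := (split₀_mem_iff sig t).mp ht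
    rcases h2 w hw with h' | h'
    · exact absurd h' hne
    · rwa [pvValid_eq] at h'
  · rintro ⟨ha, h2⟩
    refine ⟨ha, ?_⟩
    intro w hw
    by_cases hne : w = []
    · exact Or.inl hne
    · have : String.ofList w ∈ PySem.Str.split₀ sig :=
        (split₀_mem_iff sig _).mpr ⟨w, hw, hne, rfl⟩
      exact Or.inr (by rw [pvValid_eq]; exact h2 _ this)

-- ===== VERDICT (by name: the statement is the Claim_ definition above) =====
theorem normalize_signature_spec : Claim_unchanged_normalize_signature := by
  intro sig _
  unfold Spec_normalize_signature
  intro hnd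
  rw [A_char, B_char]
  by_cases hts : PySem.Str.split₀ sig = []
  · rw [if_pos hts, hts]; decide
  · rw [if_neg hts]
    have hrem : ¬ ((PySem.Str.split₀ sig).filter
        (fun t => !PySem.Set.contains pvValidModifiers t) = []) := by
      intro h
      exact hnd ((D_iff sig).mpr ⟨hts, (filter_non_nil_iff sig).mp h⟩)
    rw [if_neg hrem]

theorem normalize_signature_changed : Claim_changed_normalize_signature := by
  unfold Claim_changed_normalize_signature; decide

theorem normalize_signature_tight : Claim_exact_normalize_signature := by
  intro sig _ hD
  obtain ⟨hts, hall⟩ := (D_iff sig).mp hD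
  have hRnil : (PySem.Str.split₀ sig).filter
      (fun t => !PySem.Set.contains pvValidModifiers t) = [] :=
    (filter_non_nil_iff sig).mpr hall
  rw [A_char, B_char, if_neg hts, if_pos hRnil, hRnil, List.append_nil]
  have hF : (PySem.Str.split₀ sig).filter
      (fun t => PySem.Set.contains pvValidModifiers t) = PySem.Str.split₀ sig :=
    List.filter_eq_self.mpr (fun t ht => (contains_valid_iff t).mpr (hall t ht))
  have hsF : PySem.List.sorted ((PySem.Str.split₀ sig).filter
      (fun t => PySem.Set.contains pvValidModifiers t)) (fun t => t.toList) ≠ [] := by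
    rw [hF]
    simpa using (PySem.List.sorted_eq_nil_iff (PySem.Str.split₀ sig) (fun t => t.toList) false).not.mpr hts
  have hgoodF : ∀ t ∈ PySem.List.sorted ((PySem.Str.split₀ sig).filter
      (fun t => PySem.Set.contains pvValidModifiers t)) (fun t => t.toList), pvGood t.toList := by
    intro t ht
    have ht2 := (PySem.List.sorted_perm ((PySem.Str.split₀ sig).filter
      (fun t => PySem.Set.contains pvValidModifiers t)) (fun t => t.toList) false).mem_iff.mp ht
    exact good_str sig t (List.mem_of_mem_filter ht2)
  exact fun hcon => join_ne_empty _ hgoodF hsF hcon.symm
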